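-- pv_equiv track=rewrite | github.com/TheRealCubeAD/DSA | FuzzySchafkopf1.1.py | bestimmeAnzahlunterschiedlicheKarten
-- ===== SOURCE A (Python) =====
-- Rangordnung =  [ "7","8","9","K","10","A" ]
--
-- def wertEinerKarte(k):
--     return k[1:]
--
-- def bestimmeAnzahlunterschiedlicheKarten(D, H):
--     a = 0
--     W = []
--     for i in range(len(D)):
--         if Rangordnung.count(D[i]) == 1:
--             a = a + 1
--         else:
--             if W.count( wertEinerKarte( D[i] ) ) == 0:
--                 W.append( wertEinerKarte( D[i] ) )
--                 a = a + 1
--     for i in range(len(H)):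
--         if Rangordnung.count(H[i]) == 1:
--             a = a + 1
--         else:
--             if W.count(wertEinerKarte(H[i])) == 0:
--                 W.append(wertEinerKarte(H[i]))
--                 a = a + 1
--     return a
-- ===== SOURCE B (Python) =====
-- Rangordnung = ["7", "8", "9", "K", "10", "A"]
--
--
-- def bestimmeAnzahlunterschiedlicheKarten(D, H):
--     karten = D + H
--     plain = sum(1 for k in karten if k in Rangordnung)
--     vals = sorted(k[1:] for k in karten if k not in Rangordnung)
--     distinct = sum(1 for i in range(len(vals)) if i == 0 or vals[i] != vals[i - 1])
--     return plain + distinct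
-- ===== Notes on version B (the rewrite author's own statement) =====
-- stated objective: faster
-- what changed: Replaces A's interleaved accumulator with a per-card linear scan of a growing seen-list by two independent aggregates over D+H: a count of plain-rank cards, plus a sort of the trump values followed by an adjacent-difference scan that counts the distinct values (sort-based dedup instead of membership-based dedup).
import Mathlib
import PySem

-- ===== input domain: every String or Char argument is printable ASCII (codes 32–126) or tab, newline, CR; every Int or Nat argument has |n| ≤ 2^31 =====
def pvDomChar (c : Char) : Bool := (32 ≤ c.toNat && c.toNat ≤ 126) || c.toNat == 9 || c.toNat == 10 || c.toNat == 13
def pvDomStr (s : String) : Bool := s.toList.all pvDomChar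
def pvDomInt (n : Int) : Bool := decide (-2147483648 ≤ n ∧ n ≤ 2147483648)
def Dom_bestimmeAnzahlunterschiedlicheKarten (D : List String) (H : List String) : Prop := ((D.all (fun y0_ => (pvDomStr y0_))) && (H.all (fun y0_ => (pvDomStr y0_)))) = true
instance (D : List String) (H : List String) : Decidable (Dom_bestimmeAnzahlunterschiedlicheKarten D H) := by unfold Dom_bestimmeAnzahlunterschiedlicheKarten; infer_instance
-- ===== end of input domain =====

-- B replaces A's seen-list membership dedup by sort-then-adjacent-scan (plus a separate plain-rank count); a timing run measured B faster (sort-based dedup, O(n log n) vs O(n^2)).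

-- ===== PORT A =====
def Rangordnung : List String := ["7", "8", "9", "K", "10", "A"]

def wertEinerKarte (k : String) : String := PySem.Str.slice k (some 1) none

-- one iteration of A's (identical) loop bodies over state (a, W)
def pvStepA (st : Int × List String) (c : String) : Int × List String :=
  if Rangordnung.count c == 1 then (st.1 + 1, st.2)
  else if st.2.count (wertEinerKarte c) == 0 then (st.1 + 1, st.2 ++ [wertEinerKarte c])
  else st

def bestimmeAnzahlunterschiedlicheKarten (D : List String) (H : List String) : Int :=
  let s1 := D.foldl pvStepA (0, [])
  let s2 := H.foldl pvStepA s1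
  s2.1

-- ===== PORT B =====
-- the adjacent-difference scan: position 0 counts, position i counts iff vals[i] ≠ vals[i-1]
def pvAdjDistinct : List String → Nat
  | [] => 0
  | [_] => 1
  | a :: b :: t => (if a = b then 0 else 1) + pvAdjDistinct (b :: t)

def bestimmeAnzahlunterschiedlicheKarten_alt (D : List String) (H : List String) : Int :=
  let karten := D ++ H
  let plain : Int := (karten.countP (fun k => Rangordnung.contains k) : Nat)
  let vals := PySem.List.sorted ((karten.filter (fun k => !Rangordnung.contains k)).map wertEinerKarte) (fun x => x) false
  plain + (pvAdjDistinct vals : Nat)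

-- ===== PRECONDITION & SPEC =====
def Spec_bestimmeAnzahlunterschiedlicheKarten (D : List String) (H : List String) (out : Int) : Prop := out = bestimmeAnzahlunterschiedlicheKarten_alt D H
instance (D : List String) (H : List String) (out : Int) : Decidable (Spec_bestimmeAnzahlunterschiedlicheKarten D H out) := by unfold Spec_bestimmeAnzahlunterschiedlicheKarten; infer_instance

-- ===== CLAIM =====
def Claim_equal_bestimmeAnzahlunterschiedlicheKarten : Prop := ∀ (D : List String) (H : List String), Dom_bestimmeAnzahlunterschiedlicheKarten D H → Spec_bestimmeAnzahlunterschiedlicheKarten D H (bestimmeAnzahlunterschiedlicheKarten D H)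

-- ===== LEMMAS AND PROOFS =====

theorem count_rang_eq (c : String) :
    (Rangordnung.count c == 1) = Rangordnung.contains c := by
  by_cases h : c ∈ Rangordnung
  · rw [List.count_eq_one_of_mem (by decide) h]
    simp [h]
  · rw [List.count_eq_zero_of_not_mem h]
    simp [h]

theorem foldl_stepA (L : List String) : ∀ (a : Int) (W : List String),
    L.foldl pvStepA (a, W) =
      (a + ((L.countP (fun k => Rangordnung.contains k) : Nat) : Int)
         + ((((L.filter (fun k => !Rangordnung.contains k)).map wertEinerKarte).foldl
              PySem.Set.add W).length : Nat) - (W.length : Nat),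
       ((L.filter (fun k => !Rangordnung.contains k)).map wertEinerKarte).foldl
          PySem.Set.add W) := by
  induction L with
  | nil => intro a W; simp
  | cons c L ih =>
    intro a W
    rw [List.foldl_cons]
    by_cases hc : c ∈ Rangordnung
    · have hst : pvStepA (a, W) c = (a + 1, W) := by
        simp [pvStepA, count_rang_eq, hc]
      rw [hst, ih]
      have hcb : (Rangordnung.contains c) = true := by simp [hc]
      simp only [List.countP_cons, List.filter_cons, hcb, Bool.not_true, Bool.false_eq_true,
        if_false, if_true, Prod.mk.injEq]
      refine ⟨by push_cast; ring, by trivial⟩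
    · by_cases hw : wertEinerKarte c ∈ W
      · have hst : pvStepA (a, W) c = (a, W) := by
          have : W.count (wertEinerKarte c) ≠ 0 := by
            have := List.count_pos_iff.mpr hw; omega
          simp [pvStepA, count_rang_eq, hc, this]
        have hadd : PySem.Set.add W (wertEinerKarte c) = W := by
          simp [PySem.Set.add, hw]
        rw [hst, ih]
        have hcb : (Rangordnung.contains c) = false := by simp [hc]
        simp only [List.countP_cons, List.filter_cons, hcb, Bool.not_false, Bool.false_eq_true,
          if_false, if_true, List.map_cons, List.foldl_cons, hadd]
        simp
      · have hst : pvStepA (a, W) c = (a + 1, W ++ [wertEinerKarte c]) := by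
          simp [pvStepA, count_rang_eq, hc, List.count_eq_zero_of_not_mem hw]
        have hadd : PySem.Set.add W (wertEinerKarte c) = W ++ [wertEinerKarte c] := by
          simp [PySem.Set.add, hw]
        rw [hst, ih]
        have hcb : (Rangordnung.contains c) = false := by simp [hc]
        simp only [List.countP_cons, List.filter_cons, hcb, Bool.not_false, Bool.false_eq_true,
          if_false, if_true, List.map_cons, List.foldl_cons, hadd, List.length_append,
          List.length_cons, List.length_nil, Prod.mk.injEq]
        refine ⟨by push_cast; ring, by trivial⟩

-- on a ≤-sorted list the adjacent scan counts exactly the distinct elements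
theorem adjDistinct_sorted (l : List String) (h : l.Pairwise (· ≤ ·)) :
    pvAdjDistinct l = l.toFinset.card := by
  induction l with
  | nil => simp [pvAdjDistinct]
  | cons a t ih =>
    cases t with
    | nil => simp [pvAdjDistinct]
    | cons b t =>
      have hab : a ≤ b := (List.pairwise_cons.mp h).1 b (by simp)
      have hrest := (List.pairwise_cons.mp h).2
      by_cases hEq : a = b
      · subst hEq
        simp [pvAdjDistinct, ih hrest]
      · have hnotmem : a ∉ b :: t := by
          intro hm
          rcases List.mem_cons.mp hm with h1 | h2
          · exact hEq h1
          · have hbx : b ≤ a := (List.pairwise_cons.mp hrest).1 a h2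
            exact hEq (le_antisymm hab hbx)
        rw [show pvAdjDistinct (a :: b :: t) = 1 + pvAdjDistinct (b :: t) by
          simp [pvAdjDistinct, hEq]]
        rw [ih hrest]
        have h1 : (a :: b :: t).toFinset.card = (b :: t).toFinset.card + 1 := by
          rw [List.toFinset_cons,
            Finset.card_insert_of_notMem (fun hmem => hnotmem (List.mem_toFinset.mp hmem))]
        rw [h1, List.toFinset_cons]
        omega

-- Set.ofList's length is the number of distinct elements
theorem ofList_length_eq_card (l : List String) :
    (PySem.Set.ofList l).length = l.toFinset.card := by
  have hnd : (PySem.Set.ofList l).Nodup := PySem.Set.nodup_ofList l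
  have hfs : (PySem.Set.ofList l).toFinset = l.toFinset := by
    ext x; simp [PySem.Set.mem_ofList]
  calc (PySem.Set.ofList l).length
      = (PySem.Set.ofList l).toFinset.card := (List.toFinset_card_of_nodup hnd).symm
    _ = l.toFinset.card := by rw [hfs]

-- ===== VERDICT =====
theorem bestimmeAnzahlunterschiedlicheKarten_spec : Claim_equal_bestimmeAnzahlunterschiedlicheKarten := by
  intro D H _
  show _ = _
  unfold bestimmeAnzahlunterschiedlicheKarten bestimmeAnzahlunterschiedlicheKarten_alt
  simp only [← List.foldl_append]
  rw [foldl_stepA]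
  rw [adjDistinct_sorted _ (by
    simpa using PySem.List.sorted_pairwise
      (xs := (((D ++ H).filter (fun k => !Rangordnung.contains k)).map wertEinerKarte))
      (key := fun x => x))]
  have hfs : (PySem.List.sorted
      (((D ++ H).filter (fun k => !Rangordnung.contains k)).map wertEinerKarte)
      (fun x => x) false).toFinset
      = (((D ++ H).filter (fun k => !Rangordnung.contains k)).map wertEinerKarte).toFinset := by
    ext x; simp [List.mem_toFinset]
  rw [hfs]
  rw [← ofList_length_eq_card, PySem.Set.ofList_eq_foldl]
  simp only [List.length_nil, Nat.cast_zero, sub_zero]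
  ring
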